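-- pv_equiv track=rewrite | github.com/Sander-ONeil/Prefixes-By-String-Typing | prefix_experiments.py | interms_str
-- ===== SOURCE A (Python) =====
-- mlta = 5
--
-- def interms_str(a,b):
--     X = b
--     # a = ['g','m','s','A','K']
--     num = ''
--     for x in range(mlta):
--         if X[x] > 0:
--             num += (a[x]+'×')*int(X[x])
--     if num != '':
--         if num[-1]=='×':
--             num = num[0:-1]
--     den = ''
--     for x in range(mlta):
--         if X[x] < 0:
--             den += (a[x]+'×')*int(-X[x])
--     if den != '':
--         if den[-1]=='×':
--             den = den[0:-1]
--     if num == '':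
--         if den == '':
--             return''
--         else:
--             return '1/'+den
--     else:
--         if den =='':
--             return num
--         else:
--             return num+'/'+'('+den+')'
-- ===== SOURCE B (Python) =====
-- mlta = 5
--
-- def interms_str(a, b):
--     # Single backward recursion over the indices: each factor block is prepended at
--     # the front, with a separator only when a token already follows (flag), so there
--     # is no trailing-separator stripping; the final combine tests strings as A does.
--     def go(x):
--         if x == mlta:
--             return '', False, '', False
--         num, nh, den, dh = go(x + 1)
--         v = int(b[x])
--         if v > 0:
--             num = (a[x] + '×') * v + num if nh else (a[x] + '×') * (v - 1) + a[x]
--             nh = True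
--         elif v < 0:
--             den = (a[x] + '×') * (-v) + den if dh else (a[x] + '×') * (-v - 1) + a[x]
--             dh = True
--         return num, nh, den, dh
--     num, _, den, _ = go(0)
--     if num == '':
--         return '1/' + den if den != '' else ''
--     if den == '':
--         return num
--     return num + '/' + '(' + den + ')'
-- ===== Notes on version B (the rewrite author's own statement) =====
-- stated objective: alternative
-- what changed: B replaces A's two forward append-then-strip-trailing-separator string loops by a single backward recursion over the five indices that builds numerator and denominator front-to-back by prepending each factor with a flag-controlled separator, so no stripping step exists; the final four-way combine is kept.
import Mathlib
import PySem

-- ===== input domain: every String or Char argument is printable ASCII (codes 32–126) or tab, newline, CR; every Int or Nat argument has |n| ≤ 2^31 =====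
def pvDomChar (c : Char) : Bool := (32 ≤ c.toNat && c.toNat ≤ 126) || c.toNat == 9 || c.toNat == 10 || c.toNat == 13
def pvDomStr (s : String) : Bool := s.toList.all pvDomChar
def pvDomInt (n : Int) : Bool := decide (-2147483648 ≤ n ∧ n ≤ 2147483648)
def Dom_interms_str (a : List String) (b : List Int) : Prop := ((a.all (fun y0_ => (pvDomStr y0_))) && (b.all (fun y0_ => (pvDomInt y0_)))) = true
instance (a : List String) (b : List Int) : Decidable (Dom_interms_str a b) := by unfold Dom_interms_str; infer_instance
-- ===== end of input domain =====

-- B builds num/den by one backward recursion over the indices, prepending each factor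
-- with a flag-controlled separator, so A's strip-trailing-'×' steps disappear.

-- ===== PORT A =====
-- num += (a[x]+'×')*int(X[x]) : string repetition is flatten of replicate (int() is the identity on ints)
def interms_str (a : List String) (b : List Int) : String :=
  let num := (PySem.List.pyRange 0 5 1).foldl (fun num x =>
      if PySem.List.pyGetD b x 0 > 0 then
        num ++ (List.replicate (PySem.List.pyGetD b x 0).toNat ((PySem.List.pyGetD a x "").toList ++ ['×'])).flatten
      else num) []
  -- if num != '': if num[-1]=='×': num = num[0:-1]
  let num := if num ≠ [] then
      (if PySem.List.pyGet? num (-1) = some '×' then PySem.List.slice num none (some (-1)) else num)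
    else num
  let den := (PySem.List.pyRange 0 5 1).foldl (fun den x =>
      if PySem.List.pyGetD b x 0 < 0 then
        den ++ (List.replicate (-(PySem.List.pyGetD b x 0)).toNat ((PySem.List.pyGetD a x "").toList ++ ['×'])).flatten
      else den) []
  let den := if den ≠ [] then
      (if PySem.List.pyGet? den (-1) = some '×' then PySem.List.slice den none (some (-1)) else den)
    else den
  if num = [] then
    if den = [] then "" else String.ofList ('1' :: '/' :: den)
  else
    if den = [] then String.ofList num
    else String.ofList (num ++ '/' :: '(' :: den ++ [')'])

-- ===== PORT B =====
-- one prepend step of Source B: s = (tok+'×')*n + s if flag else (tok+'×')*(n-1) + tok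
-- ((tok+'×')*k is flatten of replicate, as in A's port)
def pvRep (t : List Char) (n : Nat) (p : List Char × Bool) : List Char × Bool :=
  if p.2 then ((List.replicate n (t ++ ['×'])).flatten ++ p.1, true)
  else ((List.replicate (n - 1) (t ++ ['×'])).flatten ++ t, true)

-- def go(x): recursion of Source B, returning ((num, nh), (den, dh))
def pvGo (a : List String) (b : List Int) (x : Nat) : (List Char × Bool) × (List Char × Bool) :=
  if _h : x < 5 then
    let p := pvGo a b (x + 1)
    let v := PySem.List.pyGetD b (x : Int) 0
    if v > 0 then (pvRep (PySem.List.pyGetD a (x : Int) "").toList v.toNat p.1, p.2)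
    else if v < 0 then (p.1, pvRep (PySem.List.pyGetD a (x : Int) "").toList (-v).toNat p.2)
    else p
  else (([], false), ([], false))
  termination_by 5 - x

def interms_str_alt (a : List String) (b : List Int) : String :=
  let q := pvGo a b 0
  let num := q.1.1
  let den := q.2.1
  if num = [] then
    if den = [] then "" else String.ofList ('1' :: '/' :: den)
  else
    if den = [] then String.ofList num
    else String.ofList (num ++ '/' :: '(' :: den ++ [')'])

-- ===== PRECONDITION & SPEC =====
-- Pre_ excludes exactly the inputs where the Python A raises IndexError:
-- b shorter than 5, or a[x] accessed (b[x] ≠ 0) with x out of range of a.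
def Pre_interms_str (a : List String) (b : List Int) : Prop :=
  5 ≤ b.length ∧ ∀ x ∈ List.range 5, b.getD x 0 ≠ 0 → x < a.length
instance (a : List String) (b : List Int) : Decidable (Pre_interms_str a b) := by
  unfold Pre_interms_str; infer_instance
def pvWitness_interms_str : List String × List Int := (["g", "m", "s", "A", "K"], [1, 0, -2, 0, 0])

def Spec_interms_str (a : List String) (b : List Int) (out : String) : Prop := out = interms_str_alt a b
instance (a : List String) (b : List Int) (out : String) : Decidable (Spec_interms_str a b out) := by unfold Spec_interms_str; infer_instance

-- ===== CLAIM (what is proved, stated in full; the proofs are below) =====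
def Claim_equal_interms_str : Prop := ∀ (a : List String) (b : List Int), Dom_interms_str a b → Pre_interms_str a b → Spec_interms_str a b (interms_str a b)

-- ===== LEMMAS AND PROOFS =====

-- token contribution of index x to the numerator / denominator
def cN (a : List String) (b : List Int) (x : Int) : List (List Char) :=
  if PySem.List.pyGetD b x 0 > 0 then
    List.replicate (PySem.List.pyGetD b x 0).toNat (PySem.List.pyGetD a x "").toList
  else []
def cD (a : List String) (b : List Int) (x : Int) : List (List Char) :=
  if PySem.List.pyGetD b x 0 < 0 then
    List.replicate (-(PySem.List.pyGetD b x 0)).toNat (PySem.List.pyGetD a x "").toList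
  else []

-- A's concatenating fold equals the flattened '×'-terminated chunks of the token list
lemma foldA_num (a : List String) (b : List Int) :
    ∀ (idxs : List Int) (accT : List (List Char)),
      idxs.foldl (fun num x =>
          if PySem.List.pyGetD b x 0 > 0 then
            num ++ (List.replicate (PySem.List.pyGetD b x 0).toNat ((PySem.List.pyGetD a x "").toList ++ ['×'])).flatten
          else num) ((accT.map (· ++ ['×'])).flatten)
      = (((idxs.foldl (fun toks x =>
            if PySem.List.pyGetD b x 0 > 0 then
              toks ++ List.replicate (PySem.List.pyGetD b x 0).toNat (PySem.List.pyGetD a x "").toList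
            else toks) accT)).map (· ++ ['×'])).flatten := by
  intro idxs
  induction idxs with
  | nil => intro accT; rfl
  | cons x xs ih =>
      intro accT
      simp only [List.foldl_cons]
      by_cases h : PySem.List.pyGetD b x 0 > 0
      · simp only [h, if_pos]
        rw [show ((accT.map (· ++ ['×'])).flatten ++ (List.replicate (PySem.List.pyGetD b x 0).toNat ((PySem.List.pyGetD a x "").toList ++ ['×'])).flatten)
              = (((accT ++ List.replicate (PySem.List.pyGetD b x 0).toNat (PySem.List.pyGetD a x "").toList).map (· ++ ['×'])).flatten) by
            simp [List.map_append, List.flatten_append, List.map_replicate]]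
        exact ih _
      · simp only [h, if_neg, not_false_iff]
        exact ih _

lemma foldA_den (a : List String) (b : List Int) :
    ∀ (idxs : List Int) (accT : List (List Char)),
      idxs.foldl (fun den x =>
          if PySem.List.pyGetD b x 0 < 0 then
            den ++ (List.replicate (-(PySem.List.pyGetD b x 0)).toNat ((PySem.List.pyGetD a x "").toList ++ ['×'])).flatten
          else den) ((accT.map (· ++ ['×'])).flatten)
      = (((idxs.foldl (fun toks x =>
            if PySem.List.pyGetD b x 0 < 0 then
              toks ++ List.replicate (-(PySem.List.pyGetD b x 0)).toNat (PySem.List.pyGetD a x "").toList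
            else toks) accT)).map (· ++ ['×'])).flatten := by
  intro idxs
  induction idxs with
  | nil => intro accT; rfl
  | cons x xs ih =>
      intro accT
      simp only [List.foldl_cons]
      by_cases h : PySem.List.pyGetD b x 0 < 0
      · simp only [h, if_pos]
        rw [show ((accT.map (· ++ ['×'])).flatten ++ (List.replicate (-(PySem.List.pyGetD b x 0)).toNat ((PySem.List.pyGetD a x "").toList ++ ['×'])).flatten)
              = (((accT ++ List.replicate (-(PySem.List.pyGetD b x 0)).toNat (PySem.List.pyGetD a x "").toList).map (· ++ ['×'])).flatten) by
            simp [List.map_append, List.flatten_append, List.map_replicate]]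
        exact ih _
      · simp only [h, if_neg, not_false_iff]
        exact ih _

-- the flattened chunks of a nonempty token list are join ++ [c]
lemma flat_eq_join_concat (c : Char) :
    ∀ (toks : List (List Char)), toks ≠ [] →
      (toks.map (· ++ [c])).flatten = PySem.Chars.join [c] toks ++ [c] := by
  intro toks
  induction toks with
  | nil => intro h; exact absurd rfl h
  | cons t rest ih =>
      intro _
      cases rest with
      | nil => simp [PySem.Chars.join, List.intercalate]
      | cons r rs =>
          rw [List.map_cons, List.flatten_cons, ih (by simp)]
          simp [PySem.Chars.join, List.intercalate, List.intersperse, List.append_assoc]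

-- A's strip-trailing-'×' of the flattened chunks is exactly the join
lemma strip_eq_join (toks : List (List Char)) :
    (if (toks.map (· ++ ['×'])).flatten ≠ [] then
        (if PySem.List.pyGet? ((toks.map (· ++ ['×'])).flatten) (-1) = some '×' then
          PySem.List.slice ((toks.map (· ++ ['×'])).flatten) none (some (-1))
        else (toks.map (· ++ ['×'])).flatten)
      else (toks.map (· ++ ['×'])).flatten)
    = PySem.Chars.join ['×'] toks := by
  cases toks with
  | nil => simp [PySem.Chars.join, List.intercalate]
  | cons t rest =>
      rw [flat_eq_join_concat '×' (t :: rest) (by simp)]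
      have hne : PySem.Chars.join ['×'] (t :: rest) ++ ['×'] ≠ [] := by simp
      rw [if_pos hne]
      have hget : PySem.List.pyGet? (PySem.Chars.join ['×'] (t :: rest) ++ ['×']) (-1) = some '×' := by
        simp [pysem]
      rw [if_pos hget, PySem.List.slice_to_neg_one]
      simp

-- join over a cons with nonempty tail
lemma join_cons_ne (t : List Char) (l : List (List Char)) (hl : l ≠ []) :
    PySem.Chars.join ['×'] (t :: l) = t ++ '×' :: PySem.Chars.join ['×'] l := by
  cases l with
  | nil => exact absurd rfl hl
  | cons r rs => simp [PySem.Chars.join, List.intercalate, List.intersperse]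

-- the '×'-terminated block prepended to a nonempty join
lemma block_join (t : List Char) :
    ∀ (n : Nat) (toks : List (List Char)), toks ≠ [] →
      (List.replicate n (t ++ ['×'])).flatten ++ PySem.Chars.join ['×'] toks
        = PySem.Chars.join ['×'] (List.replicate n t ++ toks) := by
  intro n
  induction n with
  | zero => intro toks _; simp
  | succ n ih =>
      intro toks hne
      rw [List.replicate_succ, List.flatten_cons, List.replicate_succ, List.cons_append,
          join_cons_ne t (List.replicate n t ++ toks) (by simp [hne]), ← ih toks hne]
      simp [List.append_assoc]

-- the block with a bare last token is the join of the replicated tokens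
lemma block_last (t : List Char) :
    ∀ (n : Nat), (List.replicate n (t ++ ['×'])).flatten ++ t
        = PySem.Chars.join ['×'] (List.replicate (n+1) t) := by
  intro n
  induction n with
  | zero => simp [PySem.Chars.join, List.intercalate]
  | succ n ih =>
      rw [List.replicate_succ, List.flatten_cons, List.append_assoc, ih]
      have h := join_cons_ne t (List.replicate (n+1) t) (by simp)
      rw [show (t :: List.replicate (n+1) t) = List.replicate (n+1+1) t from
            (List.replicate_succ (a := t) (n := n+1)).symm] at h
      rw [h]; simp

-- Source B's prepend of n ≥ 1 copies = join of n replicated tokens in front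
lemma rep_join (t : List Char) (n : Nat) (hn : 1 ≤ n) (toks : List (List Char)) :
    pvRep t n (PySem.Chars.join ['×'] toks, !toks.isEmpty)
      = (PySem.Chars.join ['×'] (List.replicate n t ++ toks),
         !((List.replicate n t ++ toks).isEmpty)) := by
  have hne : List.replicate n t ++ toks ≠ [] := by
    simp [List.append_eq_nil_iff]; omega
  cases toks with
  | nil =>
      simp only [pvRep, List.isEmpty_nil, Bool.not_true, if_neg (by simp : ¬ (false = true))]
      obtain ⟨m, rfl⟩ : ∃ m, n = m + 1 := ⟨n - 1, by omega⟩
      rw [block_last]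
      simp
  | cons r rs =>
      simp only [pvRep, List.isEmpty_cons, Bool.not_false]
      rw [block_join t n (r :: rs) (by simp)]
      simp [hne]

-- one unfolding of B's recursion in terms of token-list contributions
lemma pvGo_step (a : List String) (b : List Int) (x : Nat) (hx : x < 5)
    (tn td : List (List Char))
    (h : pvGo a b (x+1) = ((PySem.Chars.join ['×'] tn, !tn.isEmpty),
                           (PySem.Chars.join ['×'] td, !td.isEmpty))) :
    pvGo a b x = ((PySem.Chars.join ['×'] (cN a b x ++ tn), !((cN a b x ++ tn).isEmpty)),
                  (PySem.Chars.join ['×'] (cD a b x ++ td), !((cD a b x ++ td).isEmpty))) := by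
  rw [pvGo, dif_pos hx]
  simp only [h]
  by_cases h1 : PySem.List.pyGetD b (x : Int) 0 > 0
  · have h2 : ¬ PySem.List.pyGetD b (x : Int) 0 < 0 := by omega
    rw [if_pos h1, rep_join _ _ (by omega)]
    simp only [cN, cD, if_pos h1, if_neg h2, List.nil_append]
  · by_cases h2 : PySem.List.pyGetD b (x : Int) 0 < 0
    · rw [if_neg h1, if_pos h2, rep_join _ _ (by omega)]
      simp only [cN, cD, if_neg h1, if_pos h2, List.nil_append]
    · simp only [if_neg h1, if_neg h2, cN, cD, List.nil_append]

lemma pvGo_zero (a : List String) (b : List Int) :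
    pvGo a b 0 =
      ((PySem.Chars.join ['×'] ((PySem.List.pyRange 0 5 1).flatMap (cN a b)),
        !(((PySem.List.pyRange 0 5 1).flatMap (cN a b)).isEmpty)),
       (PySem.Chars.join ['×'] ((PySem.List.pyRange 0 5 1).flatMap (cD a b)),
        !(((PySem.List.pyRange 0 5 1).flatMap (cD a b)).isEmpty))) := by
  have h5 : pvGo a b 5 = ((PySem.Chars.join ['×'] [], !(List.isEmpty ([] : List (List Char)))),
                          (PySem.Chars.join ['×'] [], !(List.isEmpty ([] : List (List Char))))) := by
    rw [pvGo]; simp [PySem.Chars.join, List.intercalate]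
  have h4 := pvGo_step a b 4 (by norm_num) _ _ h5
  have h3 := pvGo_step a b 3 (by norm_num) _ _ h4
  have h2 := pvGo_step a b 2 (by norm_num) _ _ h3
  have h1 := pvGo_step a b 1 (by norm_num) _ _ h2
  have h0 := pvGo_step a b 0 (by norm_num) _ _ h1
  rw [h0]
  have hr : PySem.List.pyRange 0 5 1 = [0, 1, 2, 3, 4] := by decide
  rw [hr]
  simp [List.flatMap_cons]

-- A's token-list fold is the flatMap of per-index contributions
lemma foldTok_num (a : List String) (b : List Int) :
    (PySem.List.pyRange 0 5 1).foldl (fun toks x =>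
        if PySem.List.pyGetD b x 0 > 0 then
          toks ++ List.replicate (PySem.List.pyGetD b x 0).toNat (PySem.List.pyGetD a x "").toList
        else toks) []
      = (PySem.List.pyRange 0 5 1).flatMap (cN a b) := by
  have h : ∀ (toks : List (List Char)) (x : Int),
      (if PySem.List.pyGetD b x 0 > 0 then
          toks ++ List.replicate (PySem.List.pyGetD b x 0).toNat (PySem.List.pyGetD a x "").toList
        else toks) = toks ++ cN a b x := by
    intro toks x; unfold cN; split_ifs <;> simp
  rw [show (PySem.List.pyRange 0 5 1).foldl (fun toks x =>
        if PySem.List.pyGetD b x 0 > 0 then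
          toks ++ List.replicate (PySem.List.pyGetD b x 0).toNat (PySem.List.pyGetD a x "").toList
        else toks) []
      = (PySem.List.pyRange 0 5 1).foldl (fun toks x => toks ++ cN a b x) [] from
    PySem.List.foldl_congr_mem _ _ _ _ (fun acc x _ => h acc x)]
  rw [PySem.List.foldl_append_eq_flatMap]
  simp

lemma foldTok_den (a : List String) (b : List Int) :
    (PySem.List.pyRange 0 5 1).foldl (fun toks x =>
        if PySem.List.pyGetD b x 0 < 0 then
          toks ++ List.replicate (-(PySem.List.pyGetD b x 0)).toNat (PySem.List.pyGetD a x "").toList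
        else toks) []
      = (PySem.List.pyRange 0 5 1).flatMap (cD a b) := by
  have h : ∀ (toks : List (List Char)) (x : Int),
      (if PySem.List.pyGetD b x 0 < 0 then
          toks ++ List.replicate (-(PySem.List.pyGetD b x 0)).toNat (PySem.List.pyGetD a x "").toList
        else toks) = toks ++ cD a b x := by
    intro toks x; unfold cD; split_ifs <;> simp
  rw [show (PySem.List.pyRange 0 5 1).foldl (fun toks x =>
        if PySem.List.pyGetD b x 0 < 0 then
          toks ++ List.replicate (-(PySem.List.pyGetD b x 0)).toNat (PySem.List.pyGetD a x "").toList
        else toks) []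
      = (PySem.List.pyRange 0 5 1).foldl (fun toks x => toks ++ cD a b x) [] from
    PySem.List.foldl_congr_mem _ _ _ _ (fun acc x _ => h acc x)]
  rw [PySem.List.foldl_append_eq_flatMap]
  simp

-- ===== VERDICT (by name: the statement is the Claim_ definition above) =====
theorem interms_str_spec : Claim_equal_interms_str := by
  intro a b _ _
  show interms_str a b = interms_str_alt a b
  unfold interms_str interms_str_alt
  have h1 := foldA_num a b (PySem.List.pyRange 0 5 1) []
  have h2 := foldA_den a b (PySem.List.pyRange 0 5 1) []
  simp only [List.map_nil, List.flatten_nil] at h1 h2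
  rw [h1, h2]
  simp only [strip_eq_join]
  rw [pvGo_zero, foldTok_num, foldTok_den]
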